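-- pv_equiv track=rewrite | github.com/zhangkai98/ProgrammingForThePuzzledBook | Puzzle16/interval-myexercise1.py | NewRule
-- ===== SOURCE A (Python) =====
-- def NewRule(courses):
--     newEarliestFinishTime = courses[0]
--     for i in courses:
--         if i[1] < newEarliestFinishTime[1]:
--             newEarliestFinishTime = i
--         elif i[1]==newEarliestFinishTime[1]:
--             if (i[1]-i[0])<(newEarliestFinishTime[1]-newEarliestFinishTime[0]):
--                 newEarliestFinishTime = i
--             else:
--                 continue
--         else:
--             continue
--     return newEarliestFinishTime
-- ===== SOURCE B (Python) =====
-- def NewRule(courses):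
--     return sorted(courses, key=lambda c: (c[1], c[1] - c[0]))[0]
-- ===== Notes on version B (the rewrite author's own statement) =====
-- stated objective: simpler
-- what changed: Replaces the hand-written scan with running best by (finish, duration) with a stable sort on the key (finish, duration) followed by taking the first element; stability reproduces A's first-occurrence tie-breaking.
import Mathlib
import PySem

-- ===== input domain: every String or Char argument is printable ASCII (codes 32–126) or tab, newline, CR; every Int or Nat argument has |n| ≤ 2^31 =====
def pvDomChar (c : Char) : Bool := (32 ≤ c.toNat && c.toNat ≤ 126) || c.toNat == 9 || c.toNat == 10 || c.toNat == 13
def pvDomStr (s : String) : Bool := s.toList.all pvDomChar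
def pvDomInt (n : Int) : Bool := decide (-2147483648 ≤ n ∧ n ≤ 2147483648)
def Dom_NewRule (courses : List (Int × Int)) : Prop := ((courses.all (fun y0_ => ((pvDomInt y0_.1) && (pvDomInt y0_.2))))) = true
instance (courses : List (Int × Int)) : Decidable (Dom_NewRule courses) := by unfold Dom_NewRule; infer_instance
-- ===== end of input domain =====

-- B replaces A's running-best scan by a stable sort on (finish, duration) followed by taking the first element (objective: simpler).


-- ===== PORT A =====
def NewRule (courses : List (Int × Int)) : Int × Int :=
  courses.foldl
    (fun acc i =>
      if i.2 < acc.2 then i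
      else if i.2 = acc.2 then
        (if i.2 - i.1 < acc.2 - acc.1 then i else acc)
      else acc)
    (PySem.List.pyGetD courses 0 (0, 0))

-- ===== PORT B =====
def NewRule_alt (courses : List (Int × Int)) : Int × Int :=
  PySem.List.pyGetD (PySem.List.sorted2 courses (fun c => c.2) (fun c => c.2 - c.1)) 0 (0, 0)

-- ===== PRECONDITION & SPEC =====
-- A raises IndexError on the empty list (courses[0]); B's [0] does too, so the empty list is outside Pre_.
def Pre_NewRule (courses : List (Int × Int)) : Prop := courses ≠ []
instance (courses : List (Int × Int)) : Decidable (Pre_NewRule courses) := by unfold Pre_NewRule; infer_instance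
def pvWitness_NewRule : (List (Int × Int)) := [(1, 3), (2, 3), (0, 2)]
def Spec_NewRule (courses : List (Int × Int)) (out : Int × Int) : Prop := out = NewRule_alt courses
instance (courses : List (Int × Int)) (out : Int × Int) : Decidable (Spec_NewRule courses out) := by unfold Spec_NewRule; infer_instance

-- ===== CLAIM (what is proved, stated in full; the proofs are below) =====
def Claim_equal_NewRule : Prop := ∀ (courses : List (Int × Int)), Dom_NewRule courses → Pre_NewRule courses → Spec_NewRule courses (NewRule courses)

-- ===== LEMMAS AND PROOFS =====

-- Python's lexicographic tuple order on the key (finish, duration), as sorted2 compares it.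
def pvLt (a b : Int × Int) : Bool :=
  decide (a.2 < b.2) || (!decide (b.2 < a.2) && decide (a.2 - a.1 < b.2 - b.1))

-- A's branch cascade is exactly "update iff pvLt i acc".
theorem pvStep_eq (acc i : Int × Int) :
    (if i.2 < acc.2 then i
     else if i.2 = acc.2 then
       (if i.2 - i.1 < acc.2 - acc.1 then i else acc)
     else acc)
    = (if pvLt i acc then i else acc) := by
  unfold pvLt
  split_ifs with h1 h2 h3 h4 h5 h6 <;> simp_all <;> omega

-- The head of the insertion fold is the left fold of "keep the earlier unless strictly before".
theorem head_foldl_insertBy {α : Type} (before : α → α → Bool) (t : List α) :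
    ∀ (h : α) (rest : List α), ∃ rest',
      List.foldl (fun acc x => PySem.List.insertBy before x acc) (h :: rest) t
        = (t.foldl (fun acc x => if before x acc then x else acc) h) :: rest' := by
  induction t with
  | nil => intro h rest; exact ⟨rest, rfl⟩
  | cons x t ih =>
    intro h rest
    simp only [List.foldl_cons, PySem.List.insertBy]
    by_cases hb : before x h = true
    · simp only [hb]
      exact ih x (h :: rest)
    · simp only [hb, Bool.false_eq_true, if_false]
      exact ih h (PySem.List.insertBy before x rest)

theorem pvLt_irrefl (c : Int × Int) : pvLt c c = false := by
  unfold pvLt; simp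

-- ===== VERDICT (by name: the statement is the Claim_ definition above) =====
theorem NewRule_spec : Claim_equal_NewRule := by
  intro courses _ hpre
  unfold Spec_NewRule NewRule NewRule_alt PySem.List.sorted2
  cases courses with
  | nil => exact absurd rfl hpre
  | cons c t =>
    have hstep : (fun (acc i : Int × Int) =>
        if i.2 < acc.2 then i
        else if i.2 = acc.2 then
          (if i.2 - i.1 < acc.2 - acc.1 then i else acc)
        else acc) = (fun acc i => if pvLt i acc then i else acc) := by
      funext acc i; exact pvStep_eq acc i
    rw [hstep]
    simp only [List.foldl_cons, PySem.List.pyGetD_zero_cons, pvLt_irrefl,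
      Bool.false_eq_true, if_false]
    obtain ⟨rest', hr⟩ := head_foldl_insertBy pvLt t c []
    show t.foldl (fun acc i => if pvLt i acc then i else acc) c
        = PySem.List.pyGetD
            (List.foldl (fun acc x => PySem.List.insertBy pvLt x acc) [c] t) 0 (0, 0)
    rw [hr]
    simp [PySem.List.pyGetD_zero_cons]
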